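-- pv_equiv track=rewrite | github.com/manfredscheucher/supplemental-signotope-extension | final/compute_patterns.py | compute_patterns
-- ===== SOURCE A (Python) =====
-- def lexmax_cyclic4(p):
-- 	for i in range(len(p),4):
-- 		p_rot = p[i:]+p[:i]
-- 		if p < p_rot: return False
-- 	return True
--
-- def pattern_extensions(p):
-- 	for i in range(len(p)):
-- 		if p[i-4:i] == '||xx':
-- 			assert(i >= 4) # will not happend
-- 			yield p[:i-4]+'||||xxxx'+p[i:]
-- 		if p[i-4:i] == 'x||x':
-- 			assert(i >= 4) # will not happend
-- 			yield p[:i-4]+'x|||xx|x'+p[i:]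
--
-- def compute_patterns(r):
-- 	assert(r%2 == 0 and r >= 4)
-- 	if r == 4:
-- 		return {'|||xx|xx','||xx|xx|','xx|x||x|'}
-- 	if r >= 6:
-- 		patterns = {'||xxxx|x||x|'} if r == 6 else set()
-- 		for p in compute_patterns(r-2):
-- 			patterns |= set(pattern_extensions(p))
-- 		for p in patterns:
-- 			assert(lexmax_cyclic4(p)) # test that there are no cyclic copies, just to be sure
-- 		return patterns
-- ===== SOURCE B (Python) =====
-- def pattern_extensions(p):
-- 	for i in range(len(p)):
-- 		if p[i-4:i] == '||xx':
-- 			yield p[:i-4]+'||||xxxx'+p[i:]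
-- 		if p[i-4:i] == 'x||x':
-- 			yield p[:i-4]+'x|||xx|x'+p[i:]
--
-- def compute_patterns(r):
-- 	assert(r%2 == 0 and r >= 4)
-- 	cur = {'|||xx|xx','||xx|xx|','xx|x||x|'}
-- 	for level in range(6, r+1, 2):
-- 		nxt = {'||xxxx|x||x|'} if level == 6 else set()
-- 		for p in cur:
-- 			nxt |= set(pattern_extensions(p))
-- 		cur = nxt
-- 	return cur
-- ===== Notes on version B (the rewrite author's own statement) =====
-- stated objective: alternative
-- what changed: Replaces the top-down recursion on r with an iterative bottom-up loop over the even levels that rebuilds the pattern set level by level from the base case, and drops the always-true lexmax_cyclic4 assertion pass.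
import Mathlib
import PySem

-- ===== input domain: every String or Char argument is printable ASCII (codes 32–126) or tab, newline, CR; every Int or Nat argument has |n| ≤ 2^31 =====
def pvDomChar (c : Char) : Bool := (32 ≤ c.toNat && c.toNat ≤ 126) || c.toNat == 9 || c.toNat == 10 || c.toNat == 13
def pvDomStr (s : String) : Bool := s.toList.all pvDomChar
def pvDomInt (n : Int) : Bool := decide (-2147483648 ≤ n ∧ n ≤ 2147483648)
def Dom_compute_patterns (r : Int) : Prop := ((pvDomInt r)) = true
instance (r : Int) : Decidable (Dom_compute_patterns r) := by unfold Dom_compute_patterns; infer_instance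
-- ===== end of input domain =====

-- B rebuilds the pattern set with an iterative bottom-up loop over the levels 6,8,…,r
-- instead of A's top-down recursion on r (alternative decomposition; same return value).

-- ===== PORT A =====
-- helper pattern_extensions(p): the generator, collected as the list of yields in order
def pattern_extensions (p : List Char) : List String :=
  (PySem.List.pyRange 0 p.length 1).foldl (fun acc i =>
    let acc := if PySem.List.slice p (some (i-4)) (some i) = "||xx".toList
      then acc ++ [String.ofList (PySem.List.slice p none (some (i-4)) ++ "||||xxxx".toList ++ PySem.List.slice p (some i) none)]
      else acc
    if PySem.List.slice p (some (i-4)) (some i) = "x||x".toList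
      then acc ++ [String.ofList (PySem.List.slice p none (some (i-4)) ++ "x|||xx|x".toList ++ PySem.List.slice p (some i) none)]
      else acc) []

-- A's code; the asserts are no-ops on admitted inputs (Pre_ gives the leading assert;
-- lexmax_cyclic4 always returns True since range(len(p),4) is empty for len(p) ≥ 4),
-- and for r < 4 or odd r (excluded by Pre_) the Python raises/returns no set: [] here.
def compute_patterns (r : Int) : List String :=
  if r = 4 then PySem.Set.ofList ["|||xx|xx", "||xx|xx|", "xx|x||x|"]
  else if 6 ≤ r then
    let patterns : PySem.Set String := if r = 6 then PySem.Set.ofList ["||xxxx|x||x|"] else PySem.Set.empty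
    (compute_patterns (r-2)).foldl
      (fun patterns p => PySem.Set.union patterns (PySem.Set.ofList (pattern_extensions p.toList)))
      patterns
  else []
termination_by r.toNat
decreasing_by omega

-- ===== PORT B =====
def compute_patterns_alt (r : Int) : List String :=
  (PySem.List.pyRange 6 (r+1) 2).foldl
    (fun cur level =>
      let nxt : PySem.Set String := if level = 6 then PySem.Set.ofList ["||xxxx|x||x|"] else PySem.Set.empty
      cur.foldl
        (fun nxt p => PySem.Set.union nxt (PySem.Set.ofList (pattern_extensions p.toList)))
        nxt)
    (PySem.Set.ofList ["|||xx|xx", "||xx|xx|", "xx|x||x|"])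

-- ===== PRECONDITION & SPEC =====
-- exactly the inputs passing A's leading assert (otherwise Python raises AssertionError)
def Pre_compute_patterns (r : Int) : Prop := r % 2 = 0 ∧ 4 ≤ r
instance (r : Int) : Decidable (Pre_compute_patterns r) := by unfold Pre_compute_patterns; infer_instance
def pvWitness_compute_patterns : Int := (6)

def Spec_compute_patterns (r : Int) (out : List String) : Prop := out = compute_patterns_alt r
instance (r : Int) (out : List String) : Decidable (Spec_compute_patterns r out) := by unfold Spec_compute_patterns; infer_instance

-- ===== CLAIM (what is proved, stated in full; the proofs are below) =====
def Claim_equal_compute_patterns : Prop := ∀ (r : Int), Dom_compute_patterns r → Pre_compute_patterns r → Spec_compute_patterns r (compute_patterns r)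

-- ===== LEMMAS AND PROOFS =====

-- B's level loop grows by one level on the right: range(6, r+3, 2) = range(6, r+1, 2) ++ [r+2]
theorem pyRange_levels_succ (m : Nat) :
    PySem.List.pyRange 6 ((4 + 2*((m+1 : Nat):Int)) + 1) 2
      = PySem.List.pyRange 6 ((4 + 2*((m:Nat):Int)) + 1) 2 ++ [4 + 2*((m+1 : Nat):Int)] := by
  rw [PySem.List.pyRange_of_pos 6 _ (by norm_num), PySem.List.pyRange_of_pos 6 _ (by norm_num)]
  have h1 : (6:Int) < 4 + 2*((m+1 : Nat):Int) + 1 := by push_cast; omega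
  rw [if_pos h1]
  have hc1 : ((4 + 2*((m+1 : Nat):Int) + 1 - 6 + 2 - 1) / 2).toNat = m + 1 := by push_cast; omega
  rw [hc1, List.range_succ, List.map_append]
  congr 1
  · by_cases h2 : (6:Int) < 4 + 2*((m:Nat):Int) + 1
    · rw [if_pos h2]
      have hc2 : ((4 + 2*((m:Nat):Int) + 1 - 6 + 2 - 1) / 2).toNat = m := by omega
      rw [hc2]
    · rw [if_neg h2]
      have hm : m = 0 := by push_cast at h2; omega
      subst hm; simp
  · simp; ring

-- A at level 4 + 2(n+1): one unfolding of the recursion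
theorem compute_patterns_step (n : Nat) :
    compute_patterns (4 + 2*((n+1 : Nat):Int))
      = (compute_patterns (4 + 2*(n:Int))).foldl
          (fun patterns p => PySem.Set.union patterns (PySem.Set.ofList (pattern_extensions p.toList)))
          (if (4 + 2*((n+1 : Nat):Int)) = 6 then PySem.Set.ofList ["||xxxx|x||x|"] else PySem.Set.empty) := by
  rw [compute_patterns]
  have h4 : ¬ (4 + 2*((n+1 : Nat):Int) = 4) := by push_cast; omega
  have h6 : (6:Int) ≤ 4 + 2*((n+1 : Nat):Int) := by push_cast; omega
  rw [if_neg h4, if_pos h6]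
  have : (4 + 2*((n+1 : Nat):Int) - 2) = 4 + 2*(n:Int) := by push_cast; ring
  rw [this]

theorem equal_on_levels (n : Nat) :
    compute_patterns (4 + 2*(n:Int)) = compute_patterns_alt (4 + 2*(n:Int)) := by
  induction n with
  | zero =>
      have h : (4 + 2*((0:Nat):Int)) = 4 := by norm_num
      rw [h, compute_patterns, if_pos rfl]
      have hr : PySem.List.pyRange 6 ((4:Int)+1) 2 = [] := by decide
      unfold compute_patterns_alt
      rw [hr, List.foldl_nil]
  | succ m ih =>
      rw [compute_patterns_step m, ih]
      show _ = compute_patterns_alt (4 + 2*((m+1 : Nat):Int))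
      unfold compute_patterns_alt
      rw [pyRange_levels_succ m, List.foldl_append, List.foldl_cons, List.foldl_nil]

-- ===== VERDICT (by name: the statement is the Claim_ definition above) =====
theorem compute_patterns_spec : Claim_equal_compute_patterns := by
  intro r _ hpre
  obtain ⟨n, hn⟩ : ∃ n : Nat, r = 4 + 2*(n:Int) := by
    refine ⟨((r - 4)/2).toNat, ?_⟩
    obtain ⟨h2, h4⟩ := hpre
    omega
  unfold Spec_compute_patterns
  rw [hn, equal_on_levels]
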